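-- pv_equiv track=rewrite | github.com/sunxxuns/aiter | hsa/gfx950/fmha_v3_fwd_fp8/tools/tr8_layout_solver.py | tr8_read_addrs
-- ===== SOURCE A (Python) =====
-- from typing import Iterable, List, Set
--
-- def bitop3(a: int, b: int, c: int, ttbl: int) -> int:
--     out = 0
--     for i in range(32):
--         s0 = (a >> i) & 1
--         s1 = (b >> i) & 1
--         s2 = (c >> i) & 1
--         idx = s0 | (s1 << 1) | (s2 << 2)
--         bit = (ttbl >> idx) & 1
--         out |= (bit << i)
--     return out & 0xFFFFFFFF
--
-- def tr8_base(tid: int, s25: int) -> int: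
--     v2 = (tid << 6) & 0xFFFFFFFF
--     v3 = (tid << 2) & 0xFFFFFFFF
--     v4 = v3 & 48
--     v180 = (tid & 3) << 4
--     v4 = v4 | v180
--     v2 = (v2 & s25) | v4
--     v5 = tid & 16
--     v6 = (tid << 3) & 0xFFFFFFFF
--     v6 = v6 & 8
--     v2 = bitop3(v2, v5, v6, 0x36)
--     return v2 & 0xFFFFFFFF
--
-- def tr8_bases(tid: int, s25: int) -> List[int]:
--     v2 = tr8_base(tid, s25)
--     xor_seq = [0x0, 0x20, 0x460, 0x1020, 0x1460, 0x60, 0x420, 0x1060, 0x1420]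
--     return [v2 ^ x for x in xor_seq]
--
-- def tr8_read_addrs(tid: int, s25: int, base: int) -> Set[int]:
--     bases = tr8_bases(tid, s25)
--     addrs: Set[int] = set()
--     # set0: base0 offsets 0,256,512,768
--     for off in (0, 256, 512, 768):
--         addrs.add(base + bases[0] + off)
--     # set1: base1..4 offsets 1024,1152,1280,1408
--     for b, off in zip(bases[1:5], (1024, 1152, 1280, 1408)):
--         addrs.add(base + b + off)
--     # set2: base5..8 offsets 2048,2176,2304,2432
--     for b, off in zip(bases[5:9], (2048, 2176, 2304, 2432)):
--         addrs.add(base + b + off)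
--     return addrs
-- ===== SOURCE B (Python) =====
-- # B: bitop3's 32-iteration per-bit loop is replaced by the closed-form bitwise
-- # expression for truth table 0x36, and the three offset loops by one flat
-- # (xor, offset) table scanned in a single comprehension.
--
-- _TR8_TABLE = [
--     (0x0, 0), (0x0, 256), (0x0, 512), (0x0, 768),
--     (0x20, 1024), (0x460, 1152), (0x1020, 1280), (0x1460, 1408),
--     (0x60, 2048), (0x420, 2176), (0x1060, 2304), (0x1420, 2432),
-- ]
--
-- def tr8_read_addrs(tid: int, s25: int, base: int):
--     v4 = ((tid << 2) & 48) | ((tid & 3) << 4)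
--     a = (((tid << 6) & 0xFFFFFFFF) & s25) | v4
--     b = tid & 16
--     c = (tid << 3) & 8
--     v2 = (((~c) & (a ^ b)) | (c & (~b))) & 0xFFFFFFFF
--     return {base + (v2 ^ x) + off for x, off in _TR8_TABLE}
-- ===== Notes on version B (the rewrite author's own statement) =====
-- stated objective: simpler
-- what changed: bitop3's 32-iteration per-bit table-lookup loop is replaced by the closed-form bitwise expression (((~c)&(a^b))|(c&(~b)))&0xFFFFFFFF for truth table 0x36, and the three separate offset loops of tr8_read_addrs are collapsed into one scan of a flat (xor, offset) table.
import Mathlib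
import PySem

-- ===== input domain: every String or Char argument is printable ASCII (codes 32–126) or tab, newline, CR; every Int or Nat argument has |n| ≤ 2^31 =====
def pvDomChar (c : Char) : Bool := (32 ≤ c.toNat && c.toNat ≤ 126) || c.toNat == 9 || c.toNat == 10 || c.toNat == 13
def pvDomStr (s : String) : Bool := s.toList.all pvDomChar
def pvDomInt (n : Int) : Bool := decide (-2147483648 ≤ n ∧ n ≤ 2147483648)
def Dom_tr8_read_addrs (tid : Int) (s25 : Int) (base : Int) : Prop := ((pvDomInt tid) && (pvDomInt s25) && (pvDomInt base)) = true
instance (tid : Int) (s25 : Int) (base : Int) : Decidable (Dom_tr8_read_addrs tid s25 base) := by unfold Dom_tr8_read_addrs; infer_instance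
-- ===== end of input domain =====

-- B replaces bitop3's 32-iteration per-bit scan by the closed-form bitwise expression for
-- truth table 0x36 and the three offset loops by one flat (xor, offset) table; return value only
-- (the Python A returns a set, modelled as the list of distinct elements in insertion order).

-- ===== PORT A =====
-- loop body of bitop3's 'for i in range(32)' (named for proof convenience; same steps)
def bitop3Body (a b c ttbl : Int) (out : Int) (i : Int) : Int :=
  let s0 := PySem.Int.band (a >>> i.toNat) 1
  let s1 := PySem.Int.band (b >>> i.toNat) 1
  let s2 := PySem.Int.band (c >>> i.toNat) 1
  let idx := PySem.Int.bor (PySem.Int.bor s0 (s1 <<< (1 : Nat))) (s2 <<< (2 : Nat))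
  let bit := PySem.Int.band (ttbl >>> idx.toNat) 1
  PySem.Int.bor out (bit <<< i.toNat)

def bitop3 (a b c ttbl : Int) : Int :=
  let out := (PySem.List.pyRange 0 32).foldl (bitop3Body a b c ttbl) 0
  PySem.Int.band out 4294967295

def tr8_base (tid s25 : Int) : Int :=
  let v2 := PySem.Int.band (tid <<< (6 : Nat)) 4294967295
  let v3 := PySem.Int.band (tid <<< (2 : Nat)) 4294967295
  let v4 := PySem.Int.band v3 48
  let v180 := (PySem.Int.band tid 3) <<< (4 : Nat)
  let v4 := PySem.Int.bor v4 v180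
  let v2 := PySem.Int.bor (PySem.Int.band v2 s25) v4
  let v5 := PySem.Int.band tid 16
  let v6 := PySem.Int.band (tid <<< (3 : Nat)) 4294967295
  let v6 := PySem.Int.band v6 8
  let v2 := bitop3 v2 v5 v6 54
  PySem.Int.band v2 4294967295

def tr8_bases (tid s25 : Int) : List Int :=
  let v2 := tr8_base tid s25
  let xorSeq : List Int := [0, 32, 1120, 4128, 5216, 96, 1056, 4192, 5152]
  xorSeq.map (fun x => PySem.Int.bxor v2 x)

def tr8_read_addrs (tid : Int) (s25 : Int) (base : Int) : List Int :=
  let bases := tr8_bases tid s25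
  let addrs : PySem.Set Int := PySem.Set.empty
  let addrs := ([0, 256, 512, 768] : List Int).foldl
    (fun s off => PySem.Set.add s (base + PySem.List.pyGetD bases 0 0 + off)) addrs
  let addrs := ((PySem.List.slice bases (some 1) (some 5)).zip ([1024, 1152, 1280, 1408] : List Int)).foldl
    (fun s p => PySem.Set.add s (base + p.1 + p.2)) addrs
  let addrs := ((PySem.List.slice bases (some 5) (some 9)).zip ([2048, 2176, 2304, 2432] : List Int)).foldl
    (fun s p => PySem.Set.add s (base + p.1 + p.2)) addrs
  addrs

-- ===== PORT B =====
def tr8TableB : List (Int × Int) :=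
  [(0, 0), (0, 256), (0, 512), (0, 768),
   (32, 1024), (1120, 1152), (4128, 1280), (5216, 1408),
   (96, 2048), (1056, 2176), (4192, 2304), (5152, 2432)]

def tr8_read_addrs_alt (tid : Int) (s25 : Int) (base : Int) : List Int :=
  let v4 := PySem.Int.bor (PySem.Int.band (tid <<< (2 : Nat)) 48) ((PySem.Int.band tid 3) <<< (4 : Nat))
  let a := PySem.Int.bor (PySem.Int.band (PySem.Int.band (tid <<< (6 : Nat)) 4294967295) s25) v4
  let b := PySem.Int.band tid 16
  let c := PySem.Int.band (tid <<< (3 : Nat)) 8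
  let v2 := PySem.Int.band
    (PySem.Int.bor (PySem.Int.band (Int.not c) (PySem.Int.bxor a b)) (PySem.Int.band c (Int.not b)))
    4294967295
  PySem.Set.ofList (tr8TableB.map (fun p => base + PySem.Int.bxor v2 p.1 + p.2))

-- ===== PRECONDITION & SPEC =====
def Spec_tr8_read_addrs (tid : Int) (s25 : Int) (base : Int) (out : List Int) : Prop := out = tr8_read_addrs_alt tid s25 base
instance (tid : Int) (s25 : Int) (base : Int) (out : List Int) : Decidable (Spec_tr8_read_addrs tid s25 base out) := by unfold Spec_tr8_read_addrs; infer_instance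

-- ===== CLAIM (what is proved, stated in full; the proofs are below) =====
def Claim_equal_tr8_read_addrs : Prop := ∀ (tid : Int) (s25 : Int) (base : Int), Dom_tr8_read_addrs tid s25 base → Spec_tr8_read_addrs tid s25 base (tr8_read_addrs tid s25 base)

-- ===== LEMMAS AND PROOFS =====

-- a ^^^ b plus twice the carry mask is a + b
theorem pvXorAddAnd (a : Nat) : ∀ b : Nat, (a ^^^ b) + 2 * (a &&& b) = a + b := by
  induction a using Nat.strong_induction_on with
  | _ a ih =>
    intro b
    rcases Nat.eq_zero_or_pos a with rfl | ha
    · simp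
    · have hxd : (a ^^^ b) = 2 * (a / 2 ^^^ b / 2) + (a ^^^ b) % 2 := by
        rw [← Nat.xor_div_two]; omega
      have had : (a &&& b) = 2 * (a / 2 &&& b / 2) + (a &&& b) % 2 := by
        rw [← Nat.and_div_two]; omega
      have hm : (a ^^^ b) % 2 + 2 * ((a &&& b) % 2) = a % 2 + b % 2 := by
        have h1 := Nat.testBit_xor a b 0
        have h2 := Nat.testBit_and a b 0
        simp only [Nat.testBit_eq_decide_div_mod_eq, pow_zero, Nat.div_one] at h1 h2
        rcases Nat.mod_two_eq_zero_or_one a with h | h <;>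
          rcases Nat.mod_two_eq_zero_or_one b with h' | h' <;>
            rcases Nat.mod_two_eq_zero_or_one (a ^^^ b) with hx | hx <;>
              rcases Nat.mod_two_eq_zero_or_one (a &&& b) with ha2 | ha2 <;>
                simp [h, h', hx, ha2] at h1 h2 ⊢
      have ihv := ih (a / 2) (Nat.div_lt_self ha (by norm_num)) (b / 2)
      omega

theorem pvSubAnd (X C : Nat) : X - (X &&& C) = X ^^^ (X &&& C) := by
  have hx : (X ^^^ (X &&& C)) ^^^ (X &&& C) = X := Nat.xor_xor_cancel_right _ _
  have hd : (X ^^^ (X &&& C)) &&& (X &&& C) = 0 := by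
    apply Nat.eq_of_testBit_eq
    intro i
    simp only [Nat.testBit_and, Nat.testBit_xor, Nat.zero_testBit]
    cases X.testBit i <;> cases C.testBit i <;> rfl
  have h := pvXorAddAnd (X ^^^ (X &&& C)) (X &&& C)
  rw [hx, hd] at h
  omega

theorem pvTestBitSubAnd (X C i : Nat) : (X - (X &&& C)).testBit i = (X.testBit i && !(C.testBit i)) := by
  rw [pvSubAnd]
  simp only [Nat.testBit_xor, Nat.testBit_and]
  cases X.testBit i <;> cases C.testBit i <;> rfl

-- bit extraction: (m >>> k) &&& 1 is the k-th bit of m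
theorem pvShiftAndOne (m k : Nat) : (m >>> k) &&& 1 = (m.testBit k).toNat := by
  rw [Nat.and_one_is_mod, Nat.shiftRight_eq_div_pow, Nat.testBit_eq_decide_div_mod_eq]
  rcases Nat.mod_two_eq_zero_or_one (m / 2 ^ k) with h | h <;> simp [h]

theorem pvTestBitToNat (b : Bool) (j : Nat) : (b.toNat).testBit j = (b && decide (j = 0)) := by
  cases b <;> rcases j with _ | j <;> simp [Nat.testBit_succ]

-- PySem.Int.band with a negative left argument and a Nat right argument
theorem pvBandNegLeft (x : Int) (hx : x < 0) (N : Nat) :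
    PySem.Int.band x (N : Int) = ((N - (N &&& (-x - 1).toNat) : Nat) : Int) := by
  unfold PySem.Int.band
  split_ifs with h1 h2 <;> simp_all <;> omega

theorem pvBandNegRight (x : Int) (hx : x < 0) (N : Nat) :
    PySem.Int.band (N : Int) x = ((N - (N &&& (-x - 1).toNat) : Nat) : Int) := by
  unfold PySem.Int.band
  split_ifs with h1 h2 <;> simp_all <;> omega

theorem pvNotNatCast (C : Nat) : Int.not (C : Int) = -(C : Int) - 1 := by
  show Int.negSucc C = _
  rw [Int.negSucc_eq]; ring

theorem pvNotNeg (C : Nat) : Int.not (C : Int) < 0 := by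
  rw [pvNotNatCast]; omega

-- closed-form value, as a Nat, of B's masked bitop expression
def pvF (A B C : Nat) : Nat := ((A ^^^ B) - ((A ^^^ B) &&& C)) ||| (C - (C &&& B))

theorem pvF_testBit (A B C k : Nat) :
    (pvF A B C).testBit k =
      (((A.testBit k ^^ B.testBit k) && !(C.testBit k)) || (C.testBit k && !(B.testBit k))) := by
  unfold pvF
  simp only [Nat.testBit_or, pvTestBitSubAnd, Nat.testBit_xor]

-- one loop iteration of A's bitop3 at index k adds exactly bit k of pvF
theorem pvBodyEq (A B C : Nat) (acc : Int) (k : Nat) :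
    bitop3Body (A : Int) (B : Int) (C : Int) 54 acc (k : Int) =
      PySem.Int.bor acc ((((pvF A B C).testBit k).toNat : Int) <<< k) := by
  unfold bitop3Body
  simp only [Int.toNat_natCast, ← Int.natCast_shiftRight]
  rw [show ((1 : Int)) = ((1 : Nat) : Int) from rfl]
  simp only [PySem.Int.band_natCast, pvShiftAndOne, pvF_testBit]
  rcases hA : A.testBit k <;> rcases hB : B.testBit k <;> rcases hC : C.testBit k <;>
    congr 2

-- the loop accumulates pvF modulo 2^n
theorem pvLoopEq (A B C : Nat) (n : Nat) :
    (PySem.List.pyRange 0 (n : Int)).foldl (bitop3Body (A : Int) (B : Int) (C : Int) 54) 0 =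
      ((pvF A B C % 2 ^ n : Nat) : Int) := by
  induction n with
  | zero => simp [PySem.List.pyRange_one_eq_nil (le_refl (0 : Int))]
  | succ n ih =>
    rw [show ((n + 1 : Nat) : Int) = (n : Int) + 1 by push_cast; ring,
      PySem.List.pyRange_one_succ_right (by positivity), List.foldl_append]
    simp only [List.foldl_cons, List.foldl_nil, ih, pvBodyEq]
    rw [show ((((pvF A B C).testBit n).toNat : Int) <<< n) = ((((pvF A B C).testBit n).toNat <<< n : Nat) : Int) from (Int.natCast_shiftLeft _ _).symm,
      PySem.Int.bor_natCast]
    congr 1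
    apply Nat.eq_of_testBit_eq
    intro i
    simp only [Nat.testBit_or, Nat.testBit_mod_two_pow, Nat.testBit_shiftLeft, pvTestBitToNat]
    rcases lt_trichotomy i n with h | h | h
    · simp [h, Nat.lt_succ_of_lt h, show ¬ (i ≥ n) by omega]
    · subst h
      simp
    · simp [show ¬ i < n by omega, show ¬ i < n + 1 by omega, show i ≥ n by omega,
        show ¬ (i - n = 0) by omega]

theorem pvMaskEq : (4294967295 : Nat) = 2 ^ 32 - 1 := by norm_num

-- A's bitop3 with table 0x36 equals B's closed-form expression (nonnegative arguments)
theorem pvBitopClosed (a b c : Int) (ha : 0 ≤ a) (hb : 0 ≤ b) (hc : 0 ≤ c) :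
    bitop3 a b c 54 =
      PySem.Int.band
        (PySem.Int.bor (PySem.Int.band (Int.not c) (PySem.Int.bxor a b))
          (PySem.Int.band c (Int.not b))) 4294967295 := by
  obtain ⟨A, rfl⟩ := Int.eq_ofNat_of_zero_le ha
  obtain ⟨B, rfl⟩ := Int.eq_ofNat_of_zero_le hb
  obtain ⟨C, rfl⟩ := Int.eq_ofNat_of_zero_le hc
  have hL : bitop3 (A : Int) (B : Int) (C : Int) 54 = ((pvF A B C % 2 ^ 32 : Nat) : Int) := by
    unfold bitop3
    rw [show (32 : Int) = ((32 : Nat) : Int) from rfl, pvLoopEq,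
      show (4294967295 : Int) = ((4294967295 : Nat) : Int) from rfl, PySem.Int.band_natCast]
    rw [pvMaskEq, Nat.and_two_pow_sub_one_eq_mod, Nat.mod_mod_of_dvd _ dvd_rfl]
  rw [hL, PySem.Int.bxor_natCast]
  rw [show PySem.Int.band (Int.not (C : Int)) (((A ^^^ B : Nat)) : Int)
        = (((A ^^^ B) - ((A ^^^ B) &&& C) : Nat) : Int) from by
      rw [pvBandNegLeft _ (pvNotNeg C), pvNotNatCast]; norm_num]
  rw [show PySem.Int.band (C : Int) (Int.not (B : Int)) = ((C - (C &&& B) : Nat) : Int) from by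
      rw [pvBandNegRight _ (pvNotNeg B), pvNotNatCast]; norm_num]
  rw [show ((4294967295 : Int)) = ((4294967295 : Nat) : Int) from rfl,
    PySem.Int.bor_natCast, PySem.Int.band_natCast, pvMaskEq, Nat.and_two_pow_sub_one_eq_mod]
  rfl

-- chained masking: (y & 0xFFFFFFFF) & m = y & m whenever m's bits lie inside the mask
theorem pvBandBandMask (y : Int) (m : Nat) (hm : m &&& 4294967295 = m) :
    PySem.Int.band (PySem.Int.band y ((4294967295 : Nat) : Int)) (m : Int)
      = PySem.Int.band y (m : Int) := by
  by_cases hy : 0 ≤ y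
  · obtain ⟨Y, rfl⟩ := Int.eq_ofNat_of_zero_le hy
    rw [PySem.Int.band_natCast, PySem.Int.band_natCast, PySem.Int.band_natCast]
    congr 1
    apply Nat.eq_of_testBit_eq
    intro i
    have hmi := congrArg (fun t => t.testBit i) hm
    simp only [Nat.testBit_and] at hmi ⊢
    cases Y.testBit i <;> cases hMi : m.testBit i <;> simp_all
  · have hy' : y < 0 := by omega
    rw [pvBandNegLeft y hy', PySem.Int.band_natCast, pvBandNegLeft y hy']
    congr 1
    apply Nat.eq_of_testBit_eq
    intro i
    have hmi := congrArg (fun t => t.testBit i) hm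
    simp only [Nat.testBit_and] at hmi
    simp only [Nat.testBit_and, pvTestBitSubAnd]
    cases ((-y - 1).toNat).testBit i <;> cases hMi : m.testBit i <;> simp_all

theorem pvBandMask48 (y : Int) :
    PySem.Int.band (PySem.Int.band y 4294967295) 48 = PySem.Int.band y 48 := by
  have h := pvBandBandMask y 48 (by decide)
  simpa using h

theorem pvBandMask8 (y : Int) :
    PySem.Int.band (PySem.Int.band y 4294967295) 8 = PySem.Int.band y 8 := by
  have h := pvBandBandMask y 8 (by decide)
  simpa using h

theorem pvBandMaskMask (y : Int) :
    PySem.Int.band (PySem.Int.band y 4294967295) 4294967295 = PySem.Int.band y 4294967295 := by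
  have h := pvBandBandMask y 4294967295 (by decide)
  simpa using h

-- the three values fed to bitop3 are nonnegative
theorem pvBandNonneg (x : Int) (N : Int) (hN : 0 ≤ N) : 0 ≤ PySem.Int.band x N := by
  rw [PySem.Int.band_comm]
  exact PySem.Int.band_nonneg_of_nonneg_left x hN

theorem pvShiftNonneg (x : Int) (k : Nat) (hx : 0 ≤ x) : 0 ≤ x <<< k := by
  obtain ⟨X, rfl⟩ := Int.eq_ofNat_of_zero_le hx
  rw [← Int.natCast_shiftLeft]
  positivity

theorem pvBorNonneg (x y : Int) (hx : 0 ≤ x) (hy : 0 ≤ y) : 0 ≤ PySem.Int.bor x y := by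
  rw [PySem.Int.bor_of_nonneg hx hy]
  positivity

-- tr8_base equals B's v2 expression
theorem pvBaseEq (tid s25 : Int) :
    tr8_base tid s25 =
      (let v4 := PySem.Int.bor (PySem.Int.band (tid <<< (2 : Nat)) 48) ((PySem.Int.band tid 3) <<< (4 : Nat))
       let a := PySem.Int.bor (PySem.Int.band (PySem.Int.band (tid <<< (6 : Nat)) 4294967295) s25) v4
       let b := PySem.Int.band tid 16
       let c := PySem.Int.band (tid <<< (3 : Nat)) 8
       PySem.Int.band
         (PySem.Int.bor (PySem.Int.band (Int.not c) (PySem.Int.bxor a b)) (PySem.Int.band c (Int.not b)))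
         4294967295) := by
  unfold tr8_base
  dsimp only
  rw [pvBandMask48, pvBandMask8]
  rw [pvBitopClosed _ _ _
    (pvBorNonneg _ _ (PySem.Int.band_nonneg_of_nonneg_left s25 (pvBandNonneg _ _ (by norm_num)))
      (pvBorNonneg _ _ (pvBandNonneg _ _ (by norm_num))
        (pvShiftNonneg _ _ (pvBandNonneg _ _ (by norm_num)))))
    (pvBandNonneg _ _ (by norm_num)) (pvBandNonneg _ _ (by norm_num))]
  rw [pvBandMaskMask]

-- the address-set construction, with the nine enumerated bases abstracted
theorem pvReadEqAux (b0 b1 b2 b3 b4 b5 b6 b7 b8 base : Int) :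
    (let bases : List Int := [b0, b1, b2, b3, b4, b5, b6, b7, b8]
     let addrs : PySem.Set Int := PySem.Set.empty
     let addrs := ([0, 256, 512, 768] : List Int).foldl
       (fun s off => PySem.Set.add s (base + PySem.List.pyGetD bases 0 0 + off)) addrs
     let addrs := ((PySem.List.slice bases (some 1) (some 5)).zip ([1024, 1152, 1280, 1408] : List Int)).foldl
       (fun s p => PySem.Set.add s (base + p.1 + p.2)) addrs
     let addrs := ((PySem.List.slice bases (some 5) (some 9)).zip ([2048, 2176, 2304, 2432] : List Int)).foldl
       (fun s p => PySem.Set.add s (base + p.1 + p.2)) addrs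
     addrs)
      = PySem.Set.ofList
          [base + b0 + 0, base + b0 + 256, base + b0 + 512, base + b0 + 768,
           base + b1 + 1024, base + b2 + 1152, base + b3 + 1280, base + b4 + 1408,
           base + b5 + 2048, base + b6 + 2176, base + b7 + 2304, base + b8 + 2432] := by
  simp only [PySem.Set.ofList_eq_foldl]
  rw [show PySem.List.slice [b0, b1, b2, b3, b4, b5, b6, b7, b8] (some 1) (some 5) = [b1, b2, b3, b4] from rfl,
      show PySem.List.slice [b0, b1, b2, b3, b4, b5, b6, b7, b8] (some 5) (some 9) = [b5, b6, b7, b8] from rfl,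
      show PySem.List.pyGetD [b0, b1, b2, b3, b4, b5, b6, b7, b8] 0 0 = b0 from rfl]
  simp only [List.zip, List.zipWith, List.foldl]
  rfl

-- the address-set construction depends on the base value only through v
theorem pvReadEq (v base : Int) :
    (let bases := ([0, 32, 1120, 4128, 5216, 96, 1056, 4192, 5152] : List Int).map
       (fun x => PySem.Int.bxor v x)
     let addrs : PySem.Set Int := PySem.Set.empty
     let addrs := ([0, 256, 512, 768] : List Int).foldl
       (fun s off => PySem.Set.add s (base + PySem.List.pyGetD bases 0 0 + off)) addrs
     let addrs := ((PySem.List.slice bases (some 1) (some 5)).zip ([1024, 1152, 1280, 1408] : List Int)).foldl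
       (fun s p => PySem.Set.add s (base + p.1 + p.2)) addrs
     let addrs := ((PySem.List.slice bases (some 5) (some 9)).zip ([2048, 2176, 2304, 2432] : List Int)).foldl
       (fun s p => PySem.Set.add s (base + p.1 + p.2)) addrs
     addrs)
      = PySem.Set.ofList (tr8TableB.map (fun p => base + PySem.Int.bxor v p.1 + p.2)) := by
  simp only [List.map, tr8TableB]
  exact pvReadEqAux _ _ _ _ _ _ _ _ _ base

-- ===== VERDICT (by name: the statement is the Claim_ definition above) =====
theorem tr8_read_addrs_spec : Claim_equal_tr8_read_addrs := by
  intro tid s25 base _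
  unfold Spec_tr8_read_addrs tr8_read_addrs tr8_read_addrs_alt tr8_bases
  rw [pvBaseEq]
  exact pvReadEq _ base
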